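-- pv_equiv track=rewrite | github.com/justin-thakral/dullyPDF | backend/services/template_api_service.py | _format_conflicting_template_api_schema_keys
-- ===== SOURCE A (Python) =====
-- from collections import Counter
-- from typing import Any, Dict, Iterable, List, Optional
--
-- _MAX_TEMPLATE_API_ERROR_ITEMS = 25
--
-- def _format_conflicting_template_api_schema_keys(collisions: Dict[str, Iterable[str]]) -> str:
--     formatted: List[str] = []
--     for normalized_key in sorted(collisions):
--         source_counts = Counter(
--             str(source or "").strip()
--             for source in collisions[normalized_key]
--             if str(source or "").strip()
--         )
--         rendered_sources = [
--             f"{source} x{count}" if count > 1 else source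
--             for source, count in sorted(source_counts.items())
--         ]
--         if rendered_sources:
--             formatted.append(f"{normalized_key} [{', '.join(rendered_sources)}]")
--         else:
--             formatted.append(normalized_key)
--     preview = formatted[:_MAX_TEMPLATE_API_ERROR_ITEMS]
--     suffix = f" (+{len(formatted) - len(preview)} more)" if len(formatted) > len(preview) else ""
--     return (
--         "Published API Fill schema has conflicting keys after normalization: "
--         f"{', '.join(preview)}{suffix}. Rename one of the overlapping fields/groups and republish."
--     )
-- ===== SOURCE B (Python) =====
-- def _format_conflicting_template_api_schema_keys(collisions):
--     formatted = []
--     for normalized_key in sorted(collisions):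
--         cleaned = sorted(
--             s for s in (str(source or "").strip() for source in collisions[normalized_key]) if s
--         )
--         # run-length scan over the sorted list: each run is one distinct source with its count
--         pieces = []
--         i = 0
--         while i < len(cleaned):
--             j = i
--             while j < len(cleaned) and cleaned[j] == cleaned[i]:
--                 j += 1
--             n = j - i
--             pieces.append(f"{cleaned[i]} x{n}" if n > 1 else cleaned[i])
--             i = j
--         formatted.append(f"{normalized_key} [{', '.join(pieces)}]" if pieces else normalized_key)
--     preview = formatted[:25]
--     suffix = f" (+{len(formatted) - 25} more)" if len(formatted) > 25 else ""
--     return (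
--         "Published API Fill schema has conflicting keys after normalization: "
--         + ", ".join(preview) + suffix
--         + ". Rename one of the overlapping fields/groups and republish."
--     )
-- ===== Notes on version B (the rewrite author's own statement) =====
-- stated objective: alternative
-- what changed: Counts per-key duplicate sources by sorting the cleaned list and doing an index-based run-length scan over adjacent equal runs, instead of building a Counter hash dict and sorting its (source,count) item tuples.
import Mathlib
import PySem

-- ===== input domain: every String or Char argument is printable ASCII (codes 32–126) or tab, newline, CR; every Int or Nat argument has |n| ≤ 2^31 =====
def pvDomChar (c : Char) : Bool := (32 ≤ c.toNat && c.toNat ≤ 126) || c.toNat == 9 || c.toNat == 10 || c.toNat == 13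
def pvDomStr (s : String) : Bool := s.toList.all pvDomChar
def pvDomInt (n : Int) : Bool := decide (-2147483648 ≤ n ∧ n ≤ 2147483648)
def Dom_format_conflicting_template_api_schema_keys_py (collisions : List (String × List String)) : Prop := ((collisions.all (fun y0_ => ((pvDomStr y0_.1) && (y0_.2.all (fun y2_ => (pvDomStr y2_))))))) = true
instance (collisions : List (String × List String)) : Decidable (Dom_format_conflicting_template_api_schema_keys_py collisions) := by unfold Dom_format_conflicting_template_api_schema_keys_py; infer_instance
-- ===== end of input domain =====

-- B counts duplicates per key by sorting the cleaned sources and run-length scanning adjacent equal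
-- runs, instead of building a Counter dict and sorting its items; return value only, not claimed faster.

-- ===== PORT A =====
-- str(source or "").strip() for a str source is source.strip(); the generator's filter re-evaluates
-- the same strip, so the cleaned list is: map strip, then drop empties.
def format_conflicting_template_api_schema_keys_py (collisions : List (String × List String)) : String :=
  let d := PySem.Dict.ofList collisions
  let formatted := (PySem.List.sorted d.keys (fun k => k)).map (fun normalized_key =>
    let cleaned := ((d.getD normalized_key []).map (fun s => PySem.Str.strip s)).filter (fun s => s != "")
    let source_counts := PySem.Dict.counter cleaned
    let rendered_sources := (PySem.List.sorted2 source_counts.items Prod.fst Prod.snd).map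
      (fun p => if p.2 > 1 then p.1 ++ " x" ++ PySem.Int.toStr p.2 else p.1)
    if rendered_sources.isEmpty then normalized_key
    else normalized_key ++ " [" ++ PySem.Str.join ", " rendered_sources ++ "]")
  let preview := PySem.List.slice formatted none (some 25)
  let suffix := if formatted.length > preview.length
    then " (+" ++ PySem.Int.toStr ((formatted.length : Int) - (preview.length : Int)) ++ " more)"
    else ""
  "Published API Fill schema has conflicting keys after normalization: " ++
    PySem.Str.join ", " preview ++ suffix ++ ". Rename one of the overlapping fields/groups and republish."

-- ===== PORT B =====
-- the two-index while loops of Source B: the inner while that advances j over equal elements is the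
-- takeWhile of the run; the outer loop continues at i = j, i.e. on the dropWhile remainder.
def pvRle (cleaned : List String) : List String :=
  match cleaned with
  | [] => []
  | x :: xs =>
    let run := xs.takeWhile (fun s => s == x)
    let n : Nat := run.length + 1
    (if n > 1 then x ++ " x" ++ PySem.Int.toStr (n : Int) else x)
      :: pvRle (xs.dropWhile (fun s => s == x))
termination_by cleaned.length
decreasing_by
  have := List.length_dropWhile_le (fun s => s == x) xs
  simp only [List.length_cons]; omega

def format_conflicting_template_api_schema_keys_py_alt (collisions : List (String × List String)) : String :=
  let d := PySem.Dict.ofList collisions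
  let formatted := (PySem.List.sorted d.keys (fun k => k)).map (fun normalized_key =>
    let cleaned := PySem.List.sorted
      (((d.getD normalized_key []).map (fun s => PySem.Str.strip s)).filter (fun s => s != ""))
      (fun s => s)
    let pieces := pvRle cleaned
    if pieces.isEmpty then normalized_key
    else normalized_key ++ " [" ++ PySem.Str.join ", " pieces ++ "]")
  let suffix := if formatted.length > 25
    then " (+" ++ PySem.Int.toStr ((formatted.length : Int) - 25) ++ " more)"
    else ""
  "Published API Fill schema has conflicting keys after normalization: " ++
    PySem.Str.join ", " (PySem.List.slice formatted none (some 25)) ++ suffix ++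
    ". Rename one of the overlapping fields/groups and republish."

-- ===== PRECONDITION & SPEC =====
def Spec_format_conflicting_template_api_schema_keys_py (collisions : List (String × List String)) (out : String) : Prop := out = format_conflicting_template_api_schema_keys_py_alt collisions
instance (collisions : List (String × List String)) (out : String) : Decidable (Spec_format_conflicting_template_api_schema_keys_py collisions out) := by unfold Spec_format_conflicting_template_api_schema_keys_py; infer_instance

-- ===== CLAIM (what is proved, stated in full; the proofs are below) =====
def Claim_equal_format_conflicting_template_api_schema_keys_py : Prop := ∀ (collisions : List (String × List String)), Dom_format_conflicting_template_api_schema_keys_py collisions → Spec_format_conflicting_template_api_schema_keys_py collisions (format_conflicting_template_api_schema_keys_py collisions)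

-- ===== LEMMAS AND PROOFS =====

-- insertBy only compares the inserted element with accumulator members
theorem pv_insertBy_congr {α : Type} (p q : α → α → Bool) (x : α) (acc : List α)
    (h : ∀ y ∈ acc, p x y = q x y) :
    PySem.List.insertBy p x acc = PySem.List.insertBy q x acc := by
  induction acc with
  | nil => rfl
  | cons y ys ih =>
    simp only [PySem.List.insertBy, h y (by simp)]
    split
    · rfl
    · simp only [List.cons.injEq, true_and]
      exact ih (fun z hz => h z (by simp [hz]))

theorem pv_foldl_insertBy_congr {α : Type} (p q : α → α → Bool) (xs acc : List α)
    (h : ∀ a ∈ xs, ∀ b, (b ∈ acc ∨ b ∈ xs) → p a b = q a b) :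
    xs.foldl (fun acc x => PySem.List.insertBy p x acc) acc
      = xs.foldl (fun acc x => PySem.List.insertBy q x acc) acc := by
  induction xs generalizing acc with
  | nil => rfl
  | cons x xs ih =>
    simp only [List.foldl_cons]
    rw [pv_insertBy_congr p q x acc (fun y hy => h x (by simp) y (Or.inl hy))]
    exact ih _ (fun a ha b hb => h a (by simp [ha]) b (by
      rcases hb with hb | hb
      · rcases (PySem.List.insertBy_mem_iff q x b acc).mp hb with h' | h'
        · subst h'; simp
        · exact Or.inl h'
      · simp [hb]))

-- Python's sort of distinct-first tuples is the sort by first component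
theorem pv_sorted2_eq_sorted_fst (ys : List (String × Int))
    (hinj : ∀ a ∈ ys, ∀ b ∈ ys, a.1 = b.1 → a = b) :
    PySem.List.sorted2 ys Prod.fst Prod.snd = PySem.List.sorted ys Prod.fst := by
  simp only [PySem.List.sorted2, PySem.List.sorted]
  exact pv_foldl_insertBy_congr _ _ ys [] (by
    intro a ha b hb
    rcases hb with hb | hb
    · simp at hb
    · rcases lt_trichotomy a.1 b.1 with h | h | h
      · simp [h, not_lt_of_gt h]
      · have : a = b := hinj a ha b hb h
        subst this
        simp
      · simp [h, not_lt_of_gt h])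

-- sorted(Counter(xs).items()) is the count function tabulated over sorted(set(xs))
theorem pv_rendered_pairs (xs : List String) :
    PySem.List.sorted2 (PySem.Dict.counter xs).items Prod.fst Prod.snd
      = (PySem.List.sorted (PySem.Set.ofList xs) (fun s => s)).map
          (fun k => (k, (xs.count k : Int))) := by
  rw [PySem.Dict.items_counter]
  rw [pv_sorted2_eq_sorted_fst]
  · apply PySem.List.sorted_eq_of_perm_of_pairwise_lt
    · exact (PySem.List.sorted_perm (PySem.Set.ofList xs) (fun s => s) false).map _
    · exact List.Pairwise.map _ (by intro a b h; simpa using h)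
        (PySem.List.sorted_ofList_pairwise_lt xs)
  · intro a ha b hb h1
    simp only [List.mem_map] at ha hb
    obtain ⟨ka, _, rfl⟩ := ha
    obtain ⟨kb, _, rfl⟩ := hb
    simp only at h1
    subst h1
    rfl

-- everything after the first run of a sorted list is strictly greater than the run value
theorem pv_drop_gt (x : String) (xs : List String)
    (hall : ∀ z ∈ xs, x ≤ z) (hp : xs.Pairwise (fun a b => a ≤ b)) :
    ∀ z ∈ xs.dropWhile (fun s => s == x), x < z := by
  induction xs with
  | nil => simp [List.dropWhile]
  | cons y ys ih =>
    intro z hz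
    by_cases hy : y = x
    · subst hy
      rw [List.dropWhile_cons_of_pos (by simp)] at hz
      exact ih (fun w hw => hall w (by simp [hw])) hp.tail z hz
    · rw [List.dropWhile_cons_of_neg (by simpa using hy)] at hz
      have hxy : x < y := lt_of_le_of_ne (hall y (by simp)) (Ne.symm hy)
      rcases List.mem_cons.mp hz with rfl | hz
      · exact hxy
      · exact lt_of_lt_of_le hxy ((List.pairwise_cons.mp hp).1 z hz)

-- the run heads of pvRle: same recursion, values only
def pvFsts (cleaned : List String) : List String :=
  match cleaned with
  | [] => []
  | x :: xs => x :: pvFsts (xs.dropWhile (fun s => s == x))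
termination_by cleaned.length
decreasing_by
  have := List.length_dropWhile_le (fun s => s == x) xs
  simp only [List.length_cons]; omega

theorem pv_fsts_mem (ys : List String) (hp : ys.Pairwise (fun a b => a ≤ b)) :
    ∀ k, k ∈ pvFsts ys ↔ k ∈ ys := by
  induction ys using pvFsts.induct with
  | case1 => simp [pvFsts]
  | case2 x xs ih =>
    intro k
    have hds : (xs.dropWhile (fun s => s == x)).Pairwise (fun a b => a ≤ b) :=
      hp.tail.sublist (List.dropWhile_sublist _)
    rw [pvFsts]
    simp only [List.mem_cons, ih hds k]
    constructor
    · rintro (rfl | h)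
      · exact Or.inl rfl
      · exact Or.inr ((List.dropWhile_sublist _).subset h)
    · rintro (rfl | h)
      · exact Or.inl rfl
      · rw [← List.takeWhile_append_dropWhile (p := fun s => s == x) (l := xs)] at h
        rcases List.mem_append.mp h with h | h
        · exact Or.inl (by simpa using List.mem_takeWhile_imp h)
        · exact Or.inr h

theorem pv_fsts_pairwise_lt (ys : List String) (hp : ys.Pairwise (fun a b => a ≤ b)) :
    (pvFsts ys).Pairwise (fun a b => a < b) := by
  induction ys using pvFsts.induct with
  | case1 => simp [pvFsts]
  | case2 x xs ih =>
    have hds : (xs.dropWhile (fun s => s == x)).Pairwise (fun a b => a ≤ b) :=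
      hp.tail.sublist (List.dropWhile_sublist _)
    rw [pvFsts]
    refine List.pairwise_cons.mpr ⟨?_, ih hds⟩
    intro k hk
    exact pv_drop_gt x xs (fun z hz => (List.pairwise_cons.mp hp).1 z hz) hp.tail k
      ((pv_fsts_mem _ hds k).mp hk)

-- pvRle on a sorted list renders each run head with its total count
theorem pv_rle_eq (ys : List String) (hp : ys.Pairwise (fun a b => a ≤ b)) :
    pvRle ys = (pvFsts ys).map
      (fun k => if 1 < ys.count k then k ++ " x" ++ PySem.Int.toStr (ys.count k : Int) else k) := by
  induction ys using pvFsts.induct with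
  | case1 => simp [pvRle, pvFsts]
  | case2 x xs ih =>
    have hall : ∀ z ∈ xs, x ≤ z := (List.pairwise_cons.mp hp).1
    have hds : (xs.dropWhile (fun s => s == x)).Pairwise (fun a b => a ≤ b) :=
      hp.tail.sublist (List.dropWhile_sublist _)
    have hgt := pv_drop_gt x xs hall hp.tail
    -- count of x in the whole list is the run length + 1
    have hcx : (x :: xs).count x = (xs.takeWhile (fun s => s == x)).length + 1 := by
      rw [List.count_cons_self]
      congr 1
      rw [← List.takeWhile_append_dropWhile (p := fun s => s == x) (l := xs),
        List.count_append]
      have h1 : (xs.takeWhile (fun s => s == x)).count x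
          = (xs.takeWhile (fun s => s == x)).length := by
        apply List.count_eq_length.mpr
        intro z hz
        have := List.mem_takeWhile_imp hz
        simpa using (by simpa using this : z = x).symm
      have h2 : (xs.dropWhile (fun s => s == x)).count x = 0 := by
        apply List.count_eq_zero.mpr
        intro hx
        exact absurd rfl (ne_of_gt (hgt x hx))
      rw [List.takeWhile_append_dropWhile] at *
      omega
    rw [pvRle, pvFsts, List.map_cons, ih hds]
    congr 1
    · simp [hcx]
    · apply List.map_congr_left
      intro k hk
      have hkmem : k ∈ xs.dropWhile (fun s => s == x) :=
        (pv_fsts_mem _ hds k).mp hk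
      have hkx : k ≠ x := ne_of_gt (hgt k hkmem)
      have : (x :: xs).count k = (xs.dropWhile (fun s => s == x)).count k := by
        rw [List.count_cons_of_ne (Ne.symm hkx)]
        rw [← List.takeWhile_append_dropWhile (p := fun s => s == x) (l := xs),
          List.count_append]
        have h1 : (xs.takeWhile (fun s => s == x)).count k = 0 := by
          apply List.count_eq_zero.mpr
          intro hz
          exact hkx (by simpa using List.mem_takeWhile_imp hz)
        rw [List.takeWhile_append_dropWhile] at *
        omega
      rw [this]

-- the run heads of sorted(cleaned) are sorted(set(cleaned))
theorem pv_fsts_sorted (cleaned : List String) :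
    PySem.List.sorted (PySem.Set.ofList cleaned) (fun s => s)
      = pvFsts (PySem.List.sorted cleaned (fun s => s)) := by
  have hp : (PySem.List.sorted cleaned (fun s => s)).Pairwise (fun a b => a ≤ b) :=
    PySem.List.sorted_pairwise cleaned (fun s => s)
  apply PySem.List.sorted_eq_of_perm_of_pairwise_lt
  · apply (List.perm_ext_iff_of_nodup ?_ (PySem.Set.nodup_ofList cleaned)).mpr
    · intro a
      rw [pv_fsts_mem _ hp a, PySem.List.mem_sorted, PySem.Set.mem_ofList]
    · exact (pv_fsts_pairwise_lt _ hp).imp ne_of_lt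
  · exact pv_fsts_pairwise_lt _ hp

-- per-key: A's rendering list equals B's run-length pieces
theorem pv_pieces_eq (cleaned : List String) :
    (PySem.List.sorted2 (PySem.Dict.counter cleaned).items Prod.fst Prod.snd).map
      (fun p => if p.2 > 1 then p.1 ++ " x" ++ PySem.Int.toStr p.2 else p.1)
      = pvRle (PySem.List.sorted cleaned (fun s => s)) := by
  have hp : (PySem.List.sorted cleaned (fun s => s)).Pairwise (fun a b => a ≤ b) :=
    PySem.List.sorted_pairwise cleaned (fun s => s)
  rw [pv_rendered_pairs, pv_rle_eq _ hp, pv_fsts_sorted, List.map_map]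
  apply List.map_congr_left
  intro k _
  have hc : (PySem.List.sorted cleaned (fun s => s)).count k = cleaned.count k :=
    (PySem.List.sorted_perm cleaned (fun s => s) false).count_eq k
  simp only [Function.comp_def, hc]
  by_cases h : 1 < cleaned.count k
  · rw [if_pos h, if_pos (by exact_mod_cast h)]
  · rw [if_neg h, if_neg (by exact_mod_cast h)]

theorem pv_suffix_eq (formatted : List String) :
    (if formatted.length > (PySem.List.slice formatted none (some 25)).length
      then " (+" ++ PySem.Int.toStr ((formatted.length : Int)
            - ((PySem.List.slice formatted none (some 25)).length : Int)) ++ " more)"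
      else "")
    = (if formatted.length > 25
        then " (+" ++ PySem.Int.toStr ((formatted.length : Int) - 25) ++ " more)"
        else "") := by
  rw [PySem.List.slice_to formatted (by omega : (0:Int) ≤ 25)]
  have h25 : (25:Int).toNat = 25 := rfl
  simp only [List.length_take, h25]
  by_cases h : formatted.length > 25
  · rw [if_pos (by omega), if_pos (by omega)]
    have hm : ((min 25 formatted.length : Nat) : Int) = 25 := by omega
    rw [hm]
  · rw [if_neg (by omega), if_neg (by omega)]

-- ===== VERDICT (by name: the statement is the Claim_ definition above) =====
theorem format_conflicting_template_api_schema_keys_py_spec : Claim_equal_format_conflicting_template_api_schema_keys_py := by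
  intro collisions _
  unfold Spec_format_conflicting_template_api_schema_keys_py
  unfold format_conflicting_template_api_schema_keys_py format_conflicting_template_api_schema_keys_py_alt
  simp only [pv_pieces_eq, pv_suffix_eq]
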